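-- pv_equiv track=rewrite | github.com/runvnc/mindroot | src/mindroot/coreplugins/agent/long_form_recovery.py | extract_long_value
-- ===== SOURCE A (Python) =====
-- def extract_long_value(buffer, value_start, field_name=None):
--     """Extract a long-form value from a malformed JSON buffer.
--
--     Scans from value_start looking for structural close patterns.
--
--     Args:
--         buffer (str): The full buffer.
--         value_start (int): Position where the value content begins.
--         field_name (str, optional): The field name (used for heuristics).
--
--     Returns:
--         tuple: (raw_value_text, value_end_position) or (None, None).
--     """
--     close_patterns = [
--         '"}}]',
--         '"}}\n]',
--         '"}}',
--         '"}, {',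
--         '"},\n{',
--         '"},\n\n{',
--         '"}]',
--     ]
--
--     best_end = None
--     for pattern in close_patterns:
--         idx = buffer.find(pattern, value_start)
--         if idx != -1:
--             if best_end is None or idx < best_end:
--                 best_end = idx
--
--     if best_end is not None:
--         raw = buffer[value_start:best_end]
--         return raw, best_end
--
--     # No close pattern found - try to find a reasonable end
--     if buffer.rstrip().endswith(']'):
--         stripped = buffer.rstrip()
--         temp = stripped[:-1].rstrip()
--         if temp.endswith('}'):
--             temp = temp[:-1].rstrip()
--         if temp.endswith('"'):
--             raw = buffer[value_start:len(temp)]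
--             return raw, len(temp)
--
--     # Last resort: take everything from value_start to end of buffer
--     raw = buffer[value_start:]
--     raw = raw.rstrip('"}]\n ')
--     if raw:
--         return raw, len(buffer)
--
--     return None, None
-- ===== SOURCE B (Python) =====
-- def extract_long_value(buffer, value_start, field_name=None):
--     """Single left-to-right positional scan for the earliest close pattern,
--     instead of seven independent whole-buffer find() passes."""
--     patterns = ('"}}]', '"}}\n]', '"}}', '"}, {', '"},\n{', '"},\n\n{', '"}]')
--     n = len(buffer)
--     start = value_start + n if value_start < 0 else value_start
--     if start < 0:
--         start = 0
--     for i in range(start, n):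
--         if buffer.startswith(patterns, i):
--             return buffer[value_start:i], i
--
--     # No close pattern found - try to find a reasonable end
--     s = buffer.rstrip()
--     if s.endswith(']'):
--         t = s[:-1].rstrip()
--         if t.endswith('}'):
--             t = t[:-1].rstrip()
--         if t.endswith('"'):
--             return buffer[value_start:len(t)], len(t)
--
--     # Last resort: everything from value_start, trimmed of closer junk
--     tail = buffer[value_start:].rstrip('"}]\n ')
--     return (tail, n) if tail else (None, None)
-- ===== Notes on version B (the rewrite author's own statement) =====
-- stated objective: alternative
-- what changed: A runs seven independent whole-buffer str.find passes and keeps the minimum index; B makes one left-to-right positional scan that stops at the first position where any close pattern starts (buffer.startswith with a pattern tuple), keeping the same no-match fallback heuristic.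
import Mathlib
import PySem

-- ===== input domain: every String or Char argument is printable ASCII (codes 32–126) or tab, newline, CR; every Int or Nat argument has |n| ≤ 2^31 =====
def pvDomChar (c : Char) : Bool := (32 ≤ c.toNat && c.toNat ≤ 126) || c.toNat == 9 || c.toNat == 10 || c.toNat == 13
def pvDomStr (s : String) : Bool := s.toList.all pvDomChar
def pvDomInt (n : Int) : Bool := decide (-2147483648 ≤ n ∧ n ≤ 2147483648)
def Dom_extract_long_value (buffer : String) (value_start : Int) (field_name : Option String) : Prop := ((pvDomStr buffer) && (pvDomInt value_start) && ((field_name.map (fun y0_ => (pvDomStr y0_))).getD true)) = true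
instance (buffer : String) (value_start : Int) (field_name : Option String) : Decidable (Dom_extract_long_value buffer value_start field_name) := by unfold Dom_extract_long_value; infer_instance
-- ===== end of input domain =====

-- B replaces A's seven independent whole-buffer find() passes by ONE left-to-right
-- positional scan that stops at the first position where any close pattern starts
-- (objective: alternative decomposition; the no-match fallback is the same heuristic).

-- shared helper: hand port of Python's str.rstrip('"}]\n ') — exact: drops trailing
-- characters belonging to that set (PySem has no rstrip-with-chars primitive)
def pyRstripCloseJunk (s : String) : String :=
  String.ofList ((s.toList.reverse.dropWhile
    (fun c => c = '"' || c = '}' || c = ']' || c = '\n' || c = ' ')).reverse)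

-- ===== PORT A =====
-- fall-through tail of A ("last resort"), reached from two points of A's code
def elvA_last (buffer : String) (value_start : Int) : Option String × Option Int :=
  let raw := pyRstripCloseJunk (PySem.Str.slice buffer (some value_start) none)
  if raw ≠ "" then (some raw, some (PySem.Str.len buffer)) else (none, none)

def extract_long_value (buffer : String) (value_start : Int) (field_name : Option String) : Option String × Option Int :=
  let close_patterns : List String :=
    ["\"}}]", "\"}}\n]", "\"}}", "\"}, {", "\"},\n{", "\"},\n\n{", "\"}]"]
  let best_end : Option Int := close_patterns.foldl
    (fun best pattern =>
      let idx := PySem.Str.findFrom buffer pattern value_start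
      if idx ≠ -1 then
        match best with
        | none => some idx
        | some b => if idx < b then some idx else some b
      else best) none
  match best_end with
  | some be => (some (PySem.Str.slice buffer (some value_start) (some be)), some be)
  | none =>
    let stripped := PySem.Str.rstrip buffer
    if PySem.Str.endswith stripped "]" then
      let temp0 := PySem.Str.rstrip (PySem.Str.slice stripped none (some (-1)))
      let temp := if PySem.Str.endswith temp0 "}"
        then PySem.Str.rstrip (PySem.Str.slice temp0 none (some (-1))) else temp0
      if PySem.Str.endswith temp "\"" then
        (some (PySem.Str.slice buffer (some value_start) (some (PySem.Str.len temp))),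
         some (PySem.Str.len temp))
      else elvA_last buffer value_start
    else elvA_last buffer value_start

-- ===== PORT B =====
-- one positional pass: first i ≥ start where buffer.startswith(patterns, i)
def elvScan (L : List Char) (pats : List String) (i : Nat) : Option Nat :=
  if h : i < L.length then
    if pats.any (fun p => PySem.Chars.startswith (L.drop i) p.toList) then some i
    else elvScan L pats (i + 1)
  else none
termination_by L.length - i

def extract_long_value_alt (buffer : String) (value_start : Int) (field_name : Option String) : Option String × Option Int :=
  let patterns : List String :=
    ["\"}}]", "\"}}\n]", "\"}}", "\"}, {", "\"},\n{", "\"},\n\n{", "\"}]"]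
  let n : Int := PySem.Str.len buffer
  let start0 : Int := if value_start < 0 then value_start + n else value_start
  let start : Nat := (if start0 < 0 then 0 else start0).toNat
  match elvScan buffer.toList patterns start with
  | some i => (some (PySem.Str.slice buffer (some value_start) (some (i : Int))), some (i : Int))
  | none =>
    -- no close pattern found: the ']'-trimming heuristic, early-returned as an Option
    let s := PySem.Str.rstrip buffer
    let hit : Option (Option String × Option Int) :=
      if PySem.Str.endswith s "]" then
        let t0 := PySem.Str.rstrip (PySem.Str.slice s none (some (-1)))
        let t := if PySem.Str.endswith t0 "}"
          then PySem.Str.rstrip (PySem.Str.slice t0 none (some (-1))) else t0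
        if PySem.Str.endswith t "\"" then
          some (some (PySem.Str.slice buffer (some value_start) (some (PySem.Str.len t))),
                some (PySem.Str.len t))
        else none
      else none
    match hit with
    | some r => r
    | none =>
      let tail := pyRstripCloseJunk (PySem.Str.slice buffer (some value_start) none)
      if tail ≠ "" then (some tail, some n) else (none, none)

-- ===== PRECONDITION & SPEC =====
def Spec_extract_long_value (buffer : String) (value_start : Int) (field_name : Option String) (out : Option String × Option Int) : Prop := out = extract_long_value_alt buffer value_start field_name
instance (buffer : String) (value_start : Int) (field_name : Option String) (out : Option String × Option Int) : Decidable (Spec_extract_long_value buffer value_start field_name out) := by unfold Spec_extract_long_value; infer_instance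

-- ===== CLAIM (what is proved, stated in full; the proofs are below) =====
def Claim_equal_extract_long_value : Prop := ∀ (buffer : String) (value_start : Int) (field_name : Option String), Dom_extract_long_value buffer value_start field_name → Spec_extract_long_value buffer value_start field_name (extract_long_value buffer value_start field_name)

-- ===== LEMMAS AND PROOFS =====

-- "some pattern starts at position j"
def elvMatch (L : List Char) (pats : List String) (j : Nat) : Bool :=
  pats.any (fun p => PySem.Chars.startswith (L.drop j) p.toList)

-- the start position Python's find/startswith actually uses (negative from the end, clamped below at 0)
def elvClamp (n : Nat) (v : Int) : Nat :=
  (if (if v < 0 then v + n else v) < 0 then 0 else if v < 0 then v + n else v).toNat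

theorem elvScan_eq (L : List Char) (pats : List String) (i : Nat) :
    elvScan L pats i = if i < L.length then
      (if elvMatch L pats i then some i else elvScan L pats (i + 1)) else none := by
  rw [elvScan]; simp [elvMatch]

theorem elvScan_none_iff (L : List Char) (pats : List String) (i : Nat) :
    elvScan L pats i = none ↔ ∀ j, i ≤ j → j < L.length → elvMatch L pats j = false := by
  suffices h : ∀ n i, L.length - i ≤ n →
      (elvScan L pats i = none ↔ ∀ j, i ≤ j → j < L.length → elvMatch L pats j = false) from
    h (L.length - i) i le_rfl
  intro n
  induction n with
  | zero =>
    intro i hi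
    rw [elvScan_eq]
    have : ¬ i < L.length := by omega
    simp only [this, if_false]
    exact ⟨fun _ j h1 h2 => by omega, fun _ => trivial⟩
  | succ n ih =>
    intro i hi
    rw [elvScan_eq]
    by_cases hlt : i < L.length
    · simp only [hlt, if_true]
      by_cases hm : elvMatch L pats i
      · simp only [hm, if_true]
        constructor
        · intro hc; cases hc
        · intro hall; exact absurd (hall i le_rfl hlt) (by simp [hm])
      · simp only [hm, Bool.false_eq_true, if_false]
        rw [ih (i + 1) (by omega)]
        constructor
        · intro hall j h1 h2
          rcases Nat.eq_or_lt_of_le h1 with rfl | hlt'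
          · simpa using hm
          · exact hall j hlt' h2
        · intro hall j h1 h2; exact hall j (by omega) h2
    · simp only [hlt, if_false]
      exact ⟨fun _ j h1 h2 => by omega, fun _ => trivial⟩

theorem elvScan_some (L : List Char) (pats : List String) (i j : Nat)
    (h : elvScan L pats i = some j) :
    i ≤ j ∧ j < L.length ∧ elvMatch L pats j = true ∧
      ∀ k, i ≤ k → k < j → elvMatch L pats k = false := by
  induction hn : L.length - i using Nat.strong_induction_on generalizing i with
  | _ n ih =>
  rw [elvScan_eq] at h
  by_cases hlt : i < L.length
  · simp only [hlt, if_true] at h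
    by_cases hm : elvMatch L pats i
    · simp only [hm, if_true, Option.some.injEq] at h
      subst h
      exact ⟨le_rfl, hlt, hm, fun k h1 h2 => by omega⟩
    · simp only [hm, Bool.false_eq_true, if_false] at h
      obtain ⟨h1, h2, h3, h4⟩ := ih (L.length - (i + 1)) (by omega) (i := i + 1) h rfl
      refine ⟨by omega, h2, h3, fun k hk1 hk2 => ?_⟩
      rcases Nat.eq_or_lt_of_le hk1 with rfl | hlt'
      · simpa using hm
      · exact h4 k hlt' hk2
  · simp only [hlt, if_false] at h
    cases h

theorem findFrom_clamp (L sub : List Char) (v : Int) :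
    PySem.Chars.findFrom L sub v = PySem.Chars.findFrom L sub (elvClamp L.length v : Int) := by
  have key : (if v < 0 then if v + (L.length : Int) < 0 then (0 : Int) else v + (L.length : Int) else v)
      = ((elvClamp L.length v : Nat) : Int) := by
    simp only [elvClamp]; split_ifs <;> omega
  have h2 : ¬ ((elvClamp L.length v : Nat) : Int) < 0 := by
    have := Int.natCast_nonneg (elvClamp L.length v); omega
  simp only [PySem.Chars.findFrom, key, h2, if_false]

theorem findFrom_of_len_lt (L sub : List Char) (k : Nat) (h : L.length < k) :
    PySem.Chars.findFrom L sub (k : Int) = -1 := by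
  simp only [PySem.Chars.findFrom]
  have h1 : ¬ ((k : Int) < 0) := by omega
  rw [if_neg h1, if_pos (by exact_mod_cast h)]

theorem elvFold_none (f : String → Int) (pats : List String) (acc : Option Int)
    (h : ∀ p ∈ pats, f p = -1) :
    pats.foldl (fun best pattern =>
      let idx := f pattern
      if idx ≠ -1 then
        match best with
        | none => some idx
        | some b => if idx < b then some idx else some b
      else best) acc = acc := by
  induction pats generalizing acc with
  | nil => rfl
  | cons p ps ih =>
    simp only [List.foldl_cons]
    have hp : f p = -1 := h p (by simp)
    simp only [hp]
    rw [if_neg (by simp)]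
    exact ih acc (fun q hq => h q (by simp [hq]))

theorem elvFold_min (f : String → Int) (pats : List String) (j : Int) (hj : j ≠ -1)
    (hall : ∀ p ∈ pats, f p = -1 ∨ j ≤ f p) (acc : Option Int)
    (hacc : acc = some j ∨ ((∃ p ∈ pats, f p = j) ∧ ∀ b, acc = some b → j ≤ b)) :
    pats.foldl (fun best pattern =>
      let idx := f pattern
      if idx ≠ -1 then
        match best with
        | none => some idx
        | some b => if idx < b then some idx else some b
      else best) acc = some j := by
  induction pats generalizing acc with
  | nil =>
    rcases hacc with rfl | ⟨⟨p, hp, _⟩, _⟩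
    · rfl
    · cases hp
  | cons p ps ih =>
    simp only [List.foldl_cons]
    have hallp := hall p (by simp)
    have halls : ∀ q ∈ ps, f q = -1 ∨ j ≤ f q := fun q hq => hall q (by simp [hq])
    by_cases hfp : f p = -1
    · -- step leaves acc unchanged
      simp only [hfp]
      rw [if_neg (by simp)]
      apply ih halls acc
      rcases hacc with rfl | ⟨⟨q, hq, hfq⟩, hb⟩
      · exact Or.inl rfl
      · refine Or.inr ⟨⟨q, ?_, hfq⟩, hb⟩
        rcases List.mem_cons.mp hq with rfl | h'
        · exact absurd hfq (by rw [hfp]; exact fun e => hj e.symm)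
        · exact h'
    · have hjle : j ≤ f p := hallp.resolve_left hfp
      rw [if_pos (by simpa using hfp)]
      apply ih halls
      rcases hacc with rfl | ⟨⟨q, hq, hfq⟩, hb⟩
      · -- acc = some j, step keeps some j (f p ≥ j)
        have hlt : ¬ f p < j := by omega
        exact Or.inl (by simp [hlt])
      · rcases List.mem_cons.mp hq with rfl | hqs
        · -- the witness is p itself: new acc becomes some j
          cases acc with
          | none => exact Or.inl (by rw [hfq])
          | some b =>
            have hjb := hb b rfl
            by_cases hlt : f q < b
            · exact Or.inl (by
                show (if f q < b then some (f q) else some b) = some j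
                rw [if_pos hlt, hfq])
            · have hbj : b = j := by omega
              subst hbj
              exact Or.inl (by simp [hlt])
        · -- witness in the tail; new acc still ≥ j
          refine Or.inr ⟨⟨q, hqs, hfq⟩, ?_⟩
          intro b hb'
          cases acc with
          | none => simp at hb'; omega
          | some c =>
            have hjc := hb c rfl
            by_cases hlt : f p < c
            · simp [hlt] at hb'; omega
            · simp [hlt] at hb'; omega

-- "pattern p occurs somewhere at/after position i" transported to elvMatch
theorem elvMatch_of_prefix (L : List Char) (pats : List String) (p : String)
    (hp : p ∈ pats) (j : Nat) (hpre : p.toList <+: L.drop j) (hm : elvMatch L pats j = false) :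
    False := by
  simp only [elvMatch, List.any_eq_false] at hm
  have := hm p hp
  rw [PySem.Chars.startswith] at this
  exact this (List.isPrefixOf_iff_prefix.mpr hpre)

theorem fold_eq_scan (buffer : String) (value_start : Int) (pats : List String)
    (hpn : ∀ p ∈ pats, p.toList ≠ []) :
    pats.foldl (fun best pattern =>
      let idx := PySem.Str.findFrom buffer pattern value_start
      if idx ≠ -1 then
        match best with
        | none => some idx
        | some b => if idx < b then some idx else some b
      else best) none
    = (elvScan buffer.toList pats (elvClamp buffer.toList.length value_start)).map
        (fun j => (j : Int)) := by
  have hf : ∀ p : String, PySem.Str.findFrom buffer p value_start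
      = PySem.Chars.findFrom buffer.toList p.toList
          ((elvClamp buffer.toList.length value_start : Nat) : Int) := by
    intro p
    rw [PySem.Str.findFrom_eq, findFrom_clamp]
  set L := buffer.toList with hL
  set cs := elvClamp L.length value_start with hcs
  cases hscan : elvScan L pats cs with
  | none =>
    have hnone := (elvScan_none_iff L pats cs).mp hscan
    apply elvFold_none
    intro p hp
    rw [hf p]
    by_cases hlen : L.length < cs
    · exact findFrom_of_len_lt L p.toList cs hlen
    · have hcsle : cs ≤ L.length := by omega
      rw [PySem.Chars.findFrom_natCast_eq_neg_one_iff L p.toList cs hcsle]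
      intro hinf
      have hisin : PySem.Chars.isIn p.toList (L.drop cs) = true :=
        (PySem.Chars.isIn_iff_infix _ _).mpr hinf
      obtain ⟨m, hpre⟩ := (PySem.Chars.exists_prefix_drop_iff_isIn _ _).mpr hisin
      rw [List.drop_drop] at hpre
      have hlt : m + cs < L.length := by
        by_contra hge
        rw [List.drop_eq_nil_of_le (by omega)] at hpre
        exact hpn p hp (List.prefix_nil.mp hpre)
      exact elvMatch_of_prefix L pats p hp (cs + m) (by rwa [Nat.add_comm] at hpre ⊢) (hnone (cs + m) (by omega) (by omega))
  | some j =>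
    obtain ⟨hij, hjlen, hmj, hmin⟩ := elvScan_some L pats cs j hscan
    have hcsle : cs ≤ L.length := by omega
    obtain ⟨p0, hp0, hpre0⟩ : ∃ p ∈ pats, p.toList <+: L.drop j := by
      simp only [elvMatch, List.any_eq_true, PySem.Chars.startswith] at hmj
      obtain ⟨p, hp, hpre⟩ := hmj
      exact ⟨p, hp, List.isPrefixOf_iff_prefix.mp hpre⟩
    have hall : ∀ p ∈ pats, PySem.Str.findFrom buffer p value_start = -1 ∨
        (j : Int) ≤ PySem.Str.findFrom buffer p value_start := by
      intro p hp
      rw [hf p]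
      by_cases hne : PySem.Chars.findFrom L p.toList (cs : Int) = -1
      · exact Or.inl hne
      · right
        obtain ⟨h1, h2, h3⟩ := PySem.Chars.findFrom_natCast_spec L p.toList cs hcsle hne
        set r := PySem.Chars.findFrom L p.toList (cs : Int) with hr
        by_contra hlt
        rw [not_le] at hlt
        have hrj : r.toNat < j := by omega
        exact elvMatch_of_prefix L pats p hp r.toNat h2 (hmin r.toNat (by omega) hrj)
    have hfp0 : PySem.Str.findFrom buffer p0 value_start = (j : Int) := by
      rw [hf p0]
      have hne : PySem.Chars.findFrom L p0.toList (cs : Int) ≠ -1 := by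
        intro hno
        rw [PySem.Chars.findFrom_natCast_eq_neg_one_iff L p0.toList cs hcsle] at hno
        apply hno
        rw [← PySem.Chars.isIn_iff_infix, ← PySem.Chars.exists_prefix_drop_iff_isIn]
        exact ⟨j - cs, by rw [List.drop_drop]; rwa [show cs + (j - cs) = j by omega]⟩
      obtain ⟨h1, h2, h3⟩ := PySem.Chars.findFrom_natCast_spec L p0.toList cs hcsle hne
      set r := PySem.Chars.findFrom L p0.toList (cs : Int) with hr
      have hub : r.toNat ≤ j := by
        by_contra hgt
        exact (h3 j hij (by omega)) hpre0
      have hlb : j ≤ r.toNat := by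
        by_contra hlt
        exact elvMatch_of_prefix L pats p0 hp0 r.toNat h2 (hmin r.toNat (by omega) (by omega))
      omega
    exact elvFold_min _ pats (j : Int) (by omega) hall none
      (Or.inr ⟨⟨p0, hp0, hfp0⟩, fun b hb => by cases hb⟩)

-- ===== VERDICT (by name: the statement is the Claim_ definition above) =====
theorem extract_long_value_spec : Claim_equal_extract_long_value := by
  intro buffer value_start field_name _
  unfold Spec_extract_long_value
  simp only [extract_long_value, extract_long_value_alt]
  rw [fold_eq_scan buffer value_start _ (by decide)]
  have hstart : ((if (if value_start < 0 then value_start + PySem.Str.len buffer else value_start) < 0 then (0:Int) else if value_start < 0 then value_start + PySem.Str.len buffer else value_start).toNat) = elvClamp buffer.toList.length value_start := by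
    simp only [elvClamp, PySem.Str.len_eq]
  rw [hstart]
  cases elvScan buffer.toList _ (elvClamp buffer.toList.length value_start) with
  | some j => rfl
  | none =>
    simp only [elvA_last]
    split_ifs <;> rfl
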